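-- pv_equiv track=rewrite | github.com/widgetOne/league_admin | scheduler/facility.py | csv_str_to_fac_list_list
-- ===== SOURCE A (Python) =====
-- def transpose_2d_list_of_lists(list_of_lists):
--     return list(map(list, zip(*list_of_lists)))
--
-- def csv_str_to_fac_list_list(csv_str):
--     '''this takes in a string for a csv file and returns an object of the
--     the followings structure: list days[courts[times[]]] '''
--     rows = csv_str.split('\n')
--     rows = [row.split(',') for row in rows]
--     day = []
--     days = []
--     for row in rows:
--         there_are_no_games_in_row = not(any(row)) or all((div == '-1' for div in row))
--         if there_are_no_games_in_row:
--             if day: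
--                 days += [day]
--                 day = []
--             continue
--         day += [row]
--     if day:
--         days += [day]
--     return [transpose_2d_list_of_lists(day) for day in days]
-- ===== SOURCE B (Python) =====
-- def csv_str_to_fac_list_list(csv_str):
--     '''Same result as A: list days[courts[times[]]], computed by recursive
--     run-splitting (take a maximal run of game rows, recurse on the rest)
--     and an index-based transpose instead of an accumulator loop + zip(*...).'''
--     rows = [line.split(',') for line in csv_str.split('\n')]
--
--     def is_sep(row):
--         return all(c == '' for c in row) or all(c == '-1' for c in row)
--
--     def days_of(rows):
--         if not rows:
--             return []
--         if is_sep(rows[0]):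
--             return days_of(rows[1:])
--         run = []
--         rest = rows
--         while rest and not is_sep(rest[0]):
--             run.append(rest[0])
--             rest = rest[1:]
--         return [run] + days_of(rest)
--
--     def transpose(day):
--         n = min(len(r) for r in day)
--         return [[r[i] for r in day] for i in range(n)]
--
--     return [transpose(day) for day in days_of(rows)]
-- ===== Notes on version B (the rewrite author's own statement) =====
-- stated objective: alternative
-- what changed: Replaces A's single-pass accumulator loop (pending day + days lists) with recursive maximal-run splitting (skip separator rows, peel off a takeWhile run, recurse) and replaces zip(*day) with an index-based min-length transpose.
import Mathlib
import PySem

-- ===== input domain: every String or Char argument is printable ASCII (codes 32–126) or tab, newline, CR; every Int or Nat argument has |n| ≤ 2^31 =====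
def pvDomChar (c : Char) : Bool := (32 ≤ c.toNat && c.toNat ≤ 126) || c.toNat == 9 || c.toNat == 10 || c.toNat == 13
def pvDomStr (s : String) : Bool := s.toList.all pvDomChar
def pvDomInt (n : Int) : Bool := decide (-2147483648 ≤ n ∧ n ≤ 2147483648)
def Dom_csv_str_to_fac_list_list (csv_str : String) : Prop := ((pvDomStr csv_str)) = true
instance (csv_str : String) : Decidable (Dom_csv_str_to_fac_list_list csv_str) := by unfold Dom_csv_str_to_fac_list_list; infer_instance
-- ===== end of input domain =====

-- B replaces A's accumulator loop with recursive maximal-run splitting and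
-- zip(*day) with an index-based transpose; objective: alternative (same cost).

-- ===== PORT A =====

-- termination helpers for pyZipStar (cited by name in decreasing_by)
theorem pvTailSumLe (ls : List (List String)) :
    ((ls.map List.tail).map List.length).sum ≤ (ls.map List.length).sum := by
  induction ls with
  | nil => simp
  | cons a t ih =>
    simp only [List.map_cons, List.sum_cons, List.length_tail]
    omega

theorem pvTailSumLt (ls : List (List String)) (h1 : ls ≠ [])
    (h2 : ∀ l ∈ ls, l ≠ []) :
    ((ls.map List.tail).map List.length).sum < (ls.map List.length).sum := by
  cases ls with
  | nil => exact absurd rfl h1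
  | cons a t =>
    have ha : a ≠ [] := h2 a (by simp)
    have hl : 1 ≤ a.length := by cases a with | nil => exact absurd rfl ha | cons x xs => simp
    have := pvTailSumLe t
    simp only [List.map_cons, List.sum_cons, List.length_tail]
    omega

-- zip(*list_of_lists): lockstep heads, recurse on the tails (transliteration of Python's zip)
def pyZipStar (ls : List (List String)) : List (List String) :=
  if ls.isEmpty || ls.any List.isEmpty then []
  else (ls.map (fun l => l.headI)) :: pyZipStar (ls.map List.tail)
termination_by (ls.map List.length).sum
decreasing_by
  rename_i h
  simp only [Bool.or_eq_true, List.isEmpty_iff, List.any_eq_true, not_or, not_exists] at h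
  have := pvTailSumLt ls h.1 (fun l hl => by
    have := h.2 l
    simp at this
    exact this hl)
  simpa [List.map_map] using this

-- there_are_no_games_in_row = not(any(row)) or all(div == '-1' for div in row)
def aSep (row : List String) : Bool :=
  !(row.any (fun c => c != "")) || row.all (fun c => c == "-1")

-- one iteration of A's for-loop over the state (day, days)
def aStep (st : List (List String) × List (List (List String))) (row : List String) :
    List (List String) × List (List (List String)) :=
  if aSep row then
    if st.1 ≠ [] then ([], st.2 ++ [st.1]) else st
  else (st.1 ++ [row], st.2)

-- split? returns some whenever the separator is nonempty, so getD [] never fires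
def csv_str_to_fac_list_list (csv_str : String) : List (List (List String)) :=
  let rows := ((PySem.Str.split? csv_str "\n").getD []).map
      (fun row => (PySem.Str.split? row ",").getD [])
  let st := rows.foldl aStep ([], [])
  let days := if st.1 ≠ [] then st.2 ++ [st.1] else st.2
  days.map pyZipStar

-- ===== PORT B =====

def bSep (row : List String) : Bool :=
  row.all (fun c => c == "") || row.all (fun c => c == "-1")

-- days_of: skip separator rows, peel off a maximal run of game rows, recurse
def bDays (rows : List (List String)) : List (List (List String)) :=
  match rows with
  | [] => []
  | r :: rs =>
    if _h : bSep r then bDays rs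
    else ((r :: rs).takeWhile (fun x => !bSep x)) :: bDays ((r :: rs).dropWhile (fun x => !bSep x))
termination_by rows.length
decreasing_by
  · simp
  · simp only [List.dropWhile, _h, Bool.not_false]
    exact Nat.lt_succ_of_le (List.length_dropWhile_le _ _)

-- transpose(day) = [[r[i] for r in day] for i in range(min(len(r) for r in day))]
def bTranspose (day : List (List String)) : List (List String) :=
  let n := ((day.map List.length).min?).getD 0
  (List.range n).map (fun i => day.map (fun r => r.getD i ""))

def csv_str_to_fac_list_list_alt (csv_str : String) : List (List (List String)) :=
  let rows := ((PySem.Str.split? csv_str "\n").getD []).map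
      (fun line => (PySem.Str.split? line ",").getD [])
  (bDays rows).map bTranspose

-- ===== PRECONDITION & SPEC =====
def Spec_csv_str_to_fac_list_list (csv_str : String) (out : List (List (List String))) : Prop := out = csv_str_to_fac_list_list_alt csv_str
instance (csv_str : String) (out : List (List (List String))) : Decidable (Spec_csv_str_to_fac_list_list csv_str out) := by unfold Spec_csv_str_to_fac_list_list; infer_instance

-- ===== CLAIM (what is proved, stated in full; the proofs are below) =====
def Claim_equal_csv_str_to_fac_list_list : Prop := ∀ (csv_str : String), Dom_csv_str_to_fac_list_list csv_str → Spec_csv_str_to_fac_list_list csv_str (csv_str_to_fac_list_list csv_str)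

-- ===== LEMMAS AND PROOFS =====

theorem sep_eq (row : List String) : aSep row = bSep row := by
  unfold aSep bSep
  congr 1
  induction row with
  | nil => rfl
  | cons c cs ih => simp only [List.any_cons, List.all_cons, Bool.not_or, ← ih]; cases h : (c != "") <;> simp_all

-- pending-day continuation of A's loop, expressed against B's bDays
def pend (day : List (List String)) : List (List String) → List (List (List String))
  | [] => if day ≠ [] then [day] else []
  | r :: rs =>
    if bSep r then (if day ≠ [] then [day] else []) ++ bDays rs
    else pend (day ++ [r]) rs

theorem pend_ne (rows : List (List String)) : ∀ day, day ≠ [] →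
    pend day rows = (day ++ rows.takeWhile (fun x => !bSep x)) ::
      bDays (rows.dropWhile (fun x => !bSep x)) := by
  induction rows with
  | nil => intro day hd; simp [pend, hd, bDays]
  | cons r rs ih =>
    intro day hd
    by_cases h : bSep r = true
    · simp [pend, h, List.takeWhile, List.dropWhile, bDays, hd]
    · have h' : bSep r = false := by simpa using h
      simp only [pend, Bool.false_eq_true, if_false, ih (day ++ [r]) (by simp),
        List.takeWhile, List.dropWhile, h', Bool.not_false]
      simp [List.append_assoc]

theorem pend_nil (rows : List (List String)) : pend [] rows = bDays rows := by
  cases rows with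
  | nil => simp [pend, bDays]
  | cons r rs =>
    by_cases h : bSep r = true
    · simp [pend, h, bDays]
    · have h' : bSep r = false := by simpa using h
      simp only [pend, h', Bool.false_eq_true, if_false, List.nil_append]
      rw [pend_ne rs [r] (by simp)]
      simp [bDays, h', List.takeWhile, List.dropWhile]

theorem foldl_pend (rows : List (List String)) : ∀ day days,
    (if (rows.foldl aStep (day, days)).1 ≠ [] then
        (rows.foldl aStep (day, days)).2 ++ [(rows.foldl aStep (day, days)).1]
      else (rows.foldl aStep (day, days)).2) = days ++ pend day rows := by
  induction rows with
  | nil => intro day days; by_cases h : day = [] <;> simp [pend, h]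
  | cons r rs ih =>
    intro day days
    simp only [List.foldl_cons]
    by_cases h : aSep r = true
    · have hb : bSep r = true := sep_eq r ▸ h
      by_cases hd : day = []
      · simp only [aStep, h, if_true, hd, ne_eq, not_true_eq_false, if_false, ih]
        simp [pend, hb, pend_nil]
      · simp only [aStep, h, if_true, hd, ne_eq, not_false_eq_true, if_true, ih]
        simp [pend, hb, hd, pend_nil, List.append_assoc]
    · have hb : bSep r = false := by rw [← sep_eq]; simpa using h
      simp only [aStep, h, ih]
      simp [pend, hb]

-- ---- transpose equivalence ----

theorem foldl_min_le_init (xs : List Nat) (x : Nat) : xs.foldl min x ≤ x := by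
  induction xs generalizing x with
  | nil => exact Nat.le_refl x
  | cons y ys ih =>
    simp only [List.foldl_cons]
    exact Nat.le_trans (ih (min x y)) (Nat.min_le_left x y)

theorem foldl_min_le_mem (xs : List Nat) (x a : Nat) (ha : a ∈ xs) : xs.foldl min x ≤ a := by
  induction xs generalizing x with
  | nil => cases ha
  | cons y ys ih =>
    simp only [List.foldl_cons]
    rcases List.mem_cons.1 ha with h | h
    · subst h; exact Nat.le_trans (foldl_min_le_init ys (min x a)) (Nat.min_le_right x a)
    · exact ih _ h

theorem foldl_min_mem (xs : List Nat) (x : Nat) : xs.foldl min x = x ∨ xs.foldl min x ∈ xs := by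
  induction xs generalizing x with
  | nil => exact Or.inl rfl
  | cons y ys ih =>
    simp only [List.foldl_cons]
    rcases ih (min x y) with h | h
    · rw [h, Nat.min_def]
      split_ifs with hc
      · exact Or.inl rfl
      · exact Or.inr (List.mem_cons_self)
    · exact Or.inr (List.mem_cons_of_mem y h)

theorem minD_le (l : List Nat) (a : Nat) (ha : a ∈ l) : l.min?.getD 0 ≤ a := by
  cases l with
  | nil => cases ha
  | cons x xs =>
    rw [List.min?_cons', Option.getD_some]
    rcases List.mem_cons.1 ha with h | h
    · subst h; exact foldl_min_le_init xs a
    · exact foldl_min_le_mem xs x a h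

theorem minD_mem (l : List Nat) (h : l ≠ []) : l.min?.getD 0 ∈ l := by
  cases l with
  | nil => exact absurd rfl h
  | cons x xs =>
    rw [List.min?_cons', Option.getD_some]
    rcases foldl_min_mem xs x with hc | hc
    · rw [hc]; exact List.mem_cons_self
    · exact List.mem_cons_of_mem x hc

theorem minD_map_sub (l : List Nat) (h : l ≠ []) :
    (l.map (fun a => a - 1)).min?.getD 0 = l.min?.getD 0 - 1 := by
  have hne : l.map (fun a => a - 1) ≠ [] := by simpa using h
  have h1 : (l.map (fun a => a - 1)).min?.getD 0 ∈ l.map (fun a => a - 1) := minD_mem _ hne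
  have h2 : l.min?.getD 0 ∈ l := minD_mem _ h
  rcases List.mem_map.1 h1 with ⟨a, ha, hae⟩
  have hle1 : l.min?.getD 0 ≤ a := minD_le _ _ ha
  have hle2 : (l.map (fun a => a - 1)).min?.getD 0 ≤ l.min?.getD 0 - 1 :=
    minD_le _ _ (List.mem_map.2 ⟨_, h2, rfl⟩)
  omega

theorem zip_eq_transpose (ls : List (List String)) : pyZipStar ls = bTranspose ls := by
  induction hm : (ls.map List.length).sum using Nat.strong_induction_on generalizing ls with
  | _ m ihm =>
  rw [pyZipStar]
  by_cases h : (ls.isEmpty || ls.any List.isEmpty) = true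
  · rw [if_pos h]
    simp only [Bool.or_eq_true] at h
    rcases h with h | h
    · have : ls = [] := List.isEmpty_iff.1 h
      subst this; simp [bTranspose]
    · rcases List.any_eq_true.1 h with ⟨l, hl, he⟩
      have h0 : (0 : Nat) ∈ ls.map List.length := by
        refine List.mem_map.2 ⟨l, hl, ?_⟩
        simp [List.isEmpty_iff.1 he]
      have hn : ((ls.map List.length).min?).getD 0 = 0 := Nat.le_zero.1 (minD_le _ _ h0)
      simp [bTranspose, hn]
  · rw [if_neg h]
    have ih : pyZipStar (ls.map List.tail) = bTranspose (ls.map List.tail) := by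
      refine ihm ((ls.map List.tail).map List.length).sum ?_ _ rfl
      rw [← hm]
      refine pvTailSumLt ls ?_ ?_ <;>
        simp only [Bool.or_eq_true, List.isEmpty_iff, List.any_eq_true, not_or, not_exists] at h
      · exact h.1
      · intro l hl
        have := h.2 l
        simp at this
        exact this hl
    simp only [Bool.or_eq_true, List.isEmpty_iff, List.any_eq_true, not_or, not_exists] at h
    obtain ⟨hne, hnem⟩ := h
    have hallne : ∀ l ∈ ls, l ≠ [] := fun l hl => by
      have := hnem l
      simp at this
      exact this hl
    have hlen : ∀ a ∈ ls.map List.length, 1 ≤ a := by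
      intro a ha
      rcases List.mem_map.1 ha with ⟨l, hl, rfl⟩
      cases l with
      | nil => exact absurd rfl (hallne _ hl)
      | cons x xs => simp
    have hlne : ls.map List.length ≠ [] := by simpa using hne
    set n := ((ls.map List.length).min?).getD 0 with hn
    have hn1 : 1 ≤ n := hlen _ (minD_mem _ hlne)
    have htails : (ls.map List.tail).map List.length = (ls.map List.length).map (fun a => a - 1) := by
      simp only [List.map_map]
      exact List.map_congr_left (fun l _ => by simp [List.length_tail])
    have hnn : (((ls.map List.tail).map List.length).min?).getD 0 = n - 1 := by
      rw [htails, minD_map_sub _ hlne]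
    obtain ⟨k, hk⟩ : ∃ k, n = k + 1 := ⟨n - 1, by omega⟩
    rw [ih]
    unfold bTranspose
    simp only [← hn, hnn, hk, Nat.add_sub_cancel]
    rw [List.range_succ_eq_map]
    simp only [List.map_cons, List.map_map]
    congr 1
    · exact List.map_congr_left (fun l hl => by
        cases l with
        | nil => exact absurd rfl (hallne _ hl)
        | cons x xs => simp)
    · exact List.map_congr_left (fun i _ => by
        simp only [Function.comp]
        exact List.map_congr_left (fun l hl => by
          cases l with
          | nil => exact absurd rfl (hallne _ hl)
          | cons x xs => simp))

-- ===== VERDICT (by name: the statement is the Claim_ definition above) =====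
theorem csv_str_to_fac_list_list_spec : Claim_equal_csv_str_to_fac_list_list := by
  intro csv_str _
  unfold Spec_csv_str_to_fac_list_list csv_str_to_fac_list_list csv_str_to_fac_list_list_alt
  dsimp only
  rw [foldl_pend, pend_nil, List.nil_append]
  exact List.map_congr_left (fun d _ => zip_eq_transpose d)
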